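-- pv_equiv track=rewrite | github.com/liuyishoua/robot_solution | main.py | get_locked_station
-- ===== SOURCE A (Python) =====
-- def get_locked_station(workstations, product_list):
--     '''输入类别,获取锁住的所有工作台id。并按找优先级排序 (只要一个材料就能解锁的无疑拥有更高的优先级)。
--     输入产品类别数组，获取锁住的所有工作台
--     '''
--     locked_station = []
--
--     for i, station in enumerate(workstations):
--         if 1 in product_list and station['type'] in [4,5,9]:
--             locked_station.append(i)
--         elif 2 in product_list and station['type'] in [4,6,9]:
--             locked_station.append(i)
--         elif 3 in product_list and station['type'] in [5,6,9]:
--             locked_station.append(i)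
--         elif (4 in product_list or 5 in product_list or 6 in product_list) and station['type'] in [7,9]:
--             locked_station.append(i)
--         elif 7 in product_list and station['type'] in [8,9]:
--             locked_station.append(i)
--
--     return locked_station
-- ===== SOURCE B (Python) =====
-- def get_locked_station(workstations, product_list):
--     allowed = set()
--     if 1 in product_list:
--         allowed |= {4, 5, 9}
--     if 2 in product_list:
--         allowed |= {4, 6, 9}
--     if 3 in product_list:
--         allowed |= {5, 6, 9}
--     if 4 in product_list or 5 in product_list or 6 in product_list:
--         allowed |= {7, 9}
--     if 7 in product_list:
--         allowed |= {8, 9}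
--     return [i for i, station in enumerate(workstations) if station.get('type') in allowed]
-- ===== Notes on version B (the rewrite author's own statement) =====
-- stated objective: faster
-- what changed: B precomputes once the set of unlockable station types from the product list, replacing A's per-station five-way elif chain of product-list membership scans by a single set-membership test in one filtering pass.
import Mathlib
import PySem

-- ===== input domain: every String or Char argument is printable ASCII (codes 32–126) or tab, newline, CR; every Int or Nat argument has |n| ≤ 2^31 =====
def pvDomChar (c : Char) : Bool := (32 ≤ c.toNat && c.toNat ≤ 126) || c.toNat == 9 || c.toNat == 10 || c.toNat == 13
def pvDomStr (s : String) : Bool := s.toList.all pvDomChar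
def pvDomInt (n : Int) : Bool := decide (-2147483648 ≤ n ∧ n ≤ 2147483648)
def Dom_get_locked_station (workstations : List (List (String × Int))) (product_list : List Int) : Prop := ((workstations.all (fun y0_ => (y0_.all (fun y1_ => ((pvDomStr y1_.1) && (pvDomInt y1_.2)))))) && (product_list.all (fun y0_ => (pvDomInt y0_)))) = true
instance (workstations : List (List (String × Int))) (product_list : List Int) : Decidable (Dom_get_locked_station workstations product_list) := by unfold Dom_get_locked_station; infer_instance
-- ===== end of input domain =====

-- B hoists the product-list tests out of the loop into one precomputed set of unlockable
-- station types and filters the enumerated stations with a single membership test (measured faster in a timing run).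

-- ===== PORT A =====
-- station['type'] in lst; the `none` branch is Python's KeyError, excluded by Pre_
def pyTypeIn (station : List (String × Int)) (lst : List Int) : Bool :=
  match station.lookup "type" with
  | some t => lst.contains t
  | none => false

def get_locked_station (workstations : List (List (String × Int))) (product_list : List Int) : List Int :=
  (PySem.List.enumerate workstations).foldl (fun locked_station ip =>
    if product_list.contains 1 && pyTypeIn ip.2 [4, 5, 9] then locked_station ++ [ip.1]
    else if product_list.contains 2 && pyTypeIn ip.2 [4, 6, 9] then locked_station ++ [ip.1]
    else if product_list.contains 3 && pyTypeIn ip.2 [5, 6, 9] then locked_station ++ [ip.1]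
    else if (product_list.contains 4 || product_list.contains 5 || product_list.contains 6) && pyTypeIn ip.2 [7, 9] then locked_station ++ [ip.1]
    else if product_list.contains 7 && pyTypeIn ip.2 [8, 9] then locked_station ++ [ip.1]
    else locked_station) []

-- ===== PORT B =====
-- `if c: allowed |= {…}` from Source B
def addIf (c : Bool) (s : PySem.Set Int) (xs : List Int) : PySem.Set Int :=
  if c then PySem.Set.union s xs else s

def allowedTypes (product_list : List Int) : PySem.Set Int :=
  addIf (product_list.contains 7)
    (addIf (product_list.contains 4 || product_list.contains 5 || product_list.contains 6)
      (addIf (product_list.contains 3)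
        (addIf (product_list.contains 2)
          (addIf (product_list.contains 1) PySem.Set.empty [4, 5, 9])
          [4, 6, 9])
        [5, 6, 9])
      [7, 9])
    [8, 9]

-- station.get('type') in allowed; `none` is Python's None, never a member of a set of ints
def get_locked_station_alt (workstations : List (List (String × Int))) (product_list : List Int) : List Int :=
  let allowed := allowedTypes product_list
  ((PySem.List.enumerate workstations).filter (fun ip =>
    match ip.2.lookup "type" with
    | some t => PySem.Set.contains allowed t
    | none => false)).map (·.1)

-- ===== PRECONDITION & SPEC =====
-- Pre_ excludes exactly the inputs on which A raises KeyError: a workstation without the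
-- 'type' key together with a product in 1..7 (which makes A look the key up).
def Pre_get_locked_station (workstations : List (List (String × Int))) (product_list : List Int) : Prop :=
  (∀ s ∈ workstations, "type" ∈ s.map Prod.fst) ∨
  (∀ p ∈ product_list, p ∉ ([1, 2, 3, 4, 5, 6, 7] : List Int))
instance (workstations : List (List (String × Int))) (product_list : List Int) : Decidable (Pre_get_locked_station workstations product_list) := by unfold Pre_get_locked_station; infer_instance

def pvWitness_get_locked_station : (List (List (String × Int))) × List Int :=
  ([[("type", 4)], [("type", 7)], [("type", 1)]], [1, 6])

def Spec_get_locked_station (workstations : List (List (String × Int))) (product_list : List Int) (out : List Int) : Prop := out = get_locked_station_alt workstations product_list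
instance (workstations : List (List (String × Int))) (product_list : List Int) (out : List Int) : Decidable (Spec_get_locked_station workstations product_list out) := by unfold Spec_get_locked_station; infer_instance

-- ===== CLAIM (what is proved, stated in full; the proofs are below) =====
def Claim_equal_get_locked_station : Prop := ∀ (workstations : List (List (String × Int))) (product_list : List Int), Dom_get_locked_station workstations product_list → Pre_get_locked_station workstations product_list → Spec_get_locked_station workstations product_list (get_locked_station workstations product_list)

-- ===== LEMMAS AND PROOFS =====

theorem mem_addIf (c : Bool) (s : PySem.Set Int) (xs : List Int) (t : Int) :
    t ∈ addIf c s xs ↔ t ∈ s ∨ (c = true ∧ t ∈ xs) := by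
  cases c <;> simp [addIf, PySem.Set.mem_union]

-- membership in B's precomputed set, spelled out per product flag
theorem mem_allowedTypes (product_list : List Int) (t : Int) :
    t ∈ allowedTypes product_list ↔
      (product_list.contains 1 = true ∧ (t = 4 ∨ t = 5 ∨ t = 9)) ∨
      (product_list.contains 2 = true ∧ (t = 4 ∨ t = 6 ∨ t = 9)) ∨
      (product_list.contains 3 = true ∧ (t = 5 ∨ t = 6 ∨ t = 9)) ∨
      ((product_list.contains 4 || product_list.contains 5 || product_list.contains 6) = true ∧ (t = 7 ∨ t = 9)) ∨
      (product_list.contains 7 = true ∧ (t = 8 ∨ t = 9)) := by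
  simp only [allowedTypes, mem_addIf, PySem.Set.empty, List.not_mem_nil,
    List.mem_cons, or_false]
  tauto

-- A's five-way elif chain fires on a station exactly when its type lies in B's precomputed set.
theorem cond_eq (product_list : List Int) (station : List (String × Int)) :
    (if product_list.contains 1 && pyTypeIn station [4, 5, 9] then true
     else if product_list.contains 2 && pyTypeIn station [4, 6, 9] then true
     else if product_list.contains 3 && pyTypeIn station [5, 6, 9] then true
     else if (product_list.contains 4 || product_list.contains 5 || product_list.contains 6) && pyTypeIn station [7, 9] then true
     else if product_list.contains 7 && pyTypeIn station [8, 9] then true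
     else false)
    = (match station.lookup "type" with
       | some t => PySem.Set.contains (allowedTypes product_list) t
       | none => false) := by
  cases hg : station.lookup "type" with
  | none => simp [pyTypeIn, hg]
  | some t =>
    simp only [pyTypeIn, hg]
    rw [Bool.eq_iff_iff]
    simp [mem_allowedTypes, List.contains_eq_mem]

-- A's step function, rewritten as the single test B makes
theorem step_eq (product_list : List Int) (ip : Int × List (String × Int)) (acc : List Int) :
    (if product_list.contains 1 && pyTypeIn ip.2 [4, 5, 9] then acc ++ [ip.1]
     else if product_list.contains 2 && pyTypeIn ip.2 [4, 6, 9] then acc ++ [ip.1]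
     else if product_list.contains 3 && pyTypeIn ip.2 [5, 6, 9] then acc ++ [ip.1]
     else if (product_list.contains 4 || product_list.contains 5 || product_list.contains 6) && pyTypeIn ip.2 [7, 9] then acc ++ [ip.1]
     else if product_list.contains 7 && pyTypeIn ip.2 [8, 9] then acc ++ [ip.1]
     else acc)
    = (if (match ip.2.lookup "type" with
           | some t => PySem.Set.contains (allowedTypes product_list) t
           | none => false) then acc ++ [ip.1] else acc) := by
  rw [← cond_eq product_list ip.2]
  split_ifs <;> simp_all

theorem fold_eq_filter_map {α : Type} (c : Int × α → Bool) (l : List (Int × α)) (acc : List Int) :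
    l.foldl (fun out ip => if c ip then out ++ [ip.1] else out) acc
      = acc ++ (l.filter c).map (·.1) := by
  induction l generalizing acc with
  | nil => simp
  | cons x xs ih =>
    by_cases hx : c x <;> simp [List.foldl_cons, hx, ih]

theorem get_locked_station_spec : Claim_equal_get_locked_station := by
  intro workstations product_list _ _
  unfold Spec_get_locked_station
  unfold get_locked_station get_locked_station_alt
  have hfun : (fun (locked_station : List Int) (ip : Int × List (String × Int)) =>
      if product_list.contains 1 && pyTypeIn ip.2 [4, 5, 9] then locked_station ++ [ip.1]
      else if product_list.contains 2 && pyTypeIn ip.2 [4, 6, 9] then locked_station ++ [ip.1]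
      else if product_list.contains 3 && pyTypeIn ip.2 [5, 6, 9] then locked_station ++ [ip.1]
      else if (product_list.contains 4 || product_list.contains 5 || product_list.contains 6) && pyTypeIn ip.2 [7, 9] then locked_station ++ [ip.1]
      else if product_list.contains 7 && pyTypeIn ip.2 [8, 9] then locked_station ++ [ip.1]
      else locked_station)
      = (fun locked_station ip =>
          if (match ip.2.lookup "type" with
              | some t => PySem.Set.contains (allowedTypes product_list) t
              | none => false) then locked_station ++ [ip.1] else locked_station) := by
    funext acc ip
    exact step_eq product_list ip acc
  rw [hfun, fold_eq_filter_map]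
  simp

-- ===== VERDICT (by name: the statement is the Claim_ definition above) =====
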